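-- pv_equiv track=rewrite | github.com/georgia-tech-db/TokenSmith | system_improver.py | _extract_topics_from_queries
-- ===== SOURCE A (Python) =====
-- from typing import Dict, List, Optional, Tuple
--
-- def _extract_topics_from_queries(queries: List[str]) -> List[str]:
--     all_words = []
--     for query in queries:
--         words = query.lower().split()
--
--         filtered_words = [w for w in words if len(w) > 4 and w not in ['what', 'how', 'why', 'when', 'where']]
--         all_words.extend(filtered_words)
--
--
--     from collections import Counter
--     word_counts = Counter(all_words)
--
--
--     return [word for word, count in word_counts.most_common(10) if count > 1]
-- ===== SOURCE B (Python) =====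
-- def _extract_topics_from_queries(queries):
--     stop = ('what', 'how', 'why', 'when', 'where')
--     words = []
--     for q in queries:
--         for w in q.lower().split():
--             if len(w) > 4 and w not in stop:
--                 words.append(w)
--     distinct = list(dict.fromkeys(words))
--     pairs = [(w, words.count(w)) for w in distinct]
--     top = []
--     for c in sorted(set(cnt for _, cnt in pairs), reverse=True):
--         if c > 1:
--             top.extend(w for w, cnt in pairs if cnt == c)
--     return top[:10]
-- ===== Notes on version B (the rewrite author's own statement) =====
-- stated objective: alternative
-- what changed: B replaces Counter + heap-based most_common(10) by frequency bucketing: it counts each first-occurrence-distinct word with list.count, sorts only the distinct count values descending, and emits the bucket of words for each count > 1 in insertion order, truncating to 10.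
import Mathlib
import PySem

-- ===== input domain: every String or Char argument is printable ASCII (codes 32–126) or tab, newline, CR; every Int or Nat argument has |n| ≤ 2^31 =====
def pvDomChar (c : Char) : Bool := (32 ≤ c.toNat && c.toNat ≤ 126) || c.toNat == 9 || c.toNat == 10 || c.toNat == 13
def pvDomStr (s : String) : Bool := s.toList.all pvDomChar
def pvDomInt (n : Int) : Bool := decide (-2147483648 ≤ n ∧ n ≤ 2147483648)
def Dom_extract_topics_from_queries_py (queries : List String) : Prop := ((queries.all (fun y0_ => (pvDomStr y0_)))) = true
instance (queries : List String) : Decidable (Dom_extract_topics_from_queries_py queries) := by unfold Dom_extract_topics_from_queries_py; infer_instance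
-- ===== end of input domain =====

-- B replaces Counter + heap-based most_common(10) by frequency bucketing: counts per
-- first-occurrence-distinct word via list.count, sorts only the distinct count values
-- descending, emits each count's bucket (count > 1) in insertion order, truncates to 10
-- (objective: alternative).

-- ===== PORT A =====
-- A, step for step: build all_words by extending with each query's filtered words, Counter it,
-- then most_common(10) — items stably sorted by count descending, first 10 — filtered to count > 1.
def extract_topics_from_queries_py (queries : List String) : List String :=
  let all_words : List String := queries.foldl (fun acc query =>
    let words := PySem.Str.split₀ (PySem.Str.lower query)
    let filtered_words := words.filter
      (fun w => decide (4 < PySem.Str.len w) && !(["what", "how", "why", "when", "where"].contains w))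
    acc ++ filtered_words) []
  let word_counts := PySem.Dict.counter all_words
  -- most_common(10) = items sorted by count descending (stable, insertion order on ties), first 10
  let most_common := (PySem.List.sorted word_counts.items (fun kv => kv.2) true).take 10
  (most_common.filter (fun kv => decide (1 < kv.2))).map Prod.fst

-- ===== PORT B =====
-- B, step for step: append each kept word in a nested loop, dedup to first-occurrence distinct
-- words, pair each with words.count(w), then for each distinct count value (sorted descending)
-- with c > 1 extend with that count's bucket of words; finally take the first 10.
def extract_topics_from_queries_py_alt (queries : List String) : List String :=
  let stop := ["what", "how", "why", "when", "where"]
  let words : List String := queries.foldl (fun acc q =>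
    (PySem.Str.split₀ (PySem.Str.lower q)).foldl (fun acc w =>
      if decide (4 < PySem.Str.len w) && !(stop.contains w) then acc ++ [w] else acc) acc) []
  let distinct := PySem.List.dedup words
  let pairs : List (String × Int) := distinct.map (fun w => (w, (PySem.List.count words w : Int)))
  let top : List String :=
    (PySem.List.sorted (PySem.Set.ofList (pairs.map (fun kv => kv.2))) (fun x => x) true).foldl
      (fun acc c =>
        if decide (1 < c)
        then acc ++ (pairs.filter (fun kv => kv.2 == c)).map (fun kv => kv.1)
        else acc) []
  top.take 10

-- ===== PRECONDITION & SPEC =====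
def Spec_extract_topics_from_queries_py (queries : List String) (out : List String) : Prop := out = extract_topics_from_queries_py_alt queries
instance (queries : List String) (out : List String) : Decidable (Spec_extract_topics_from_queries_py queries out) := by unfold Spec_extract_topics_from_queries_py; infer_instance

-- ===== CLAIM (what is proved, stated in full; the proofs are below) =====
def Claim_equal_extract_topics_from_queries_py : Prop := ∀ (queries : List String), Dom_extract_topics_from_queries_py queries → Spec_extract_topics_from_queries_py queries (extract_topics_from_queries_py queries)

-- ===== LEMMAS AND PROOFS =====

-- In a list where every element satisfying p precedes every element failing it (expressed pairwise),
-- filtering after a take equals taking after the filter.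
theorem pv_take_filter_comm {α : Type} (p : α → Bool) :
    ∀ (s : List α) (n : Nat), s.Pairwise (fun a b => p b = true → p a = true) →
    (s.take n).filter p = (s.filter p).take n := by
  intro s
  induction s with
  | nil => intro n _; simp
  | cons a t ih =>
    intro n h
    rcases List.pairwise_cons.mp h with ⟨ha, ht⟩
    cases n with
    | zero => simp
    | succ m =>
      by_cases hp : p a = true
      · simp [hp, ih m ht]
      · have hall : ∀ b ∈ t, ¬ p b = true := fun b hb hpb => hp (ha b hb hpb)
        have h1 : t.filter p = [] := List.filter_eq_nil_iff.mpr hall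
        have h2 : (t.take m).filter p = [] :=
          List.filter_eq_nil_iff.mpr (fun b hb => hall b (List.mem_of_mem_take hb))
        simp [hp, h1, h2]

theorem pv_flatMap_congr {α β : Type} (ds : List α) (f g : α → List β)
    (h : ∀ c ∈ ds, f c = g c) : ds.flatMap f = ds.flatMap g := by
  induction ds with
  | nil => rfl
  | cons c t ih =>
    simp only [List.flatMap_cons, h c (List.mem_cons_self), ih (fun d hd => h d (List.mem_cons_of_mem _ hd))]

-- insertBy skips a prefix on which the predicate is false
theorem pv_insertBy_skip {α : Type} (p : α → α → Bool) (x : α) :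
    ∀ (as bs : List α), (∀ a ∈ as, p x a = false) →
    PySem.List.insertBy p x (as ++ bs) = as ++ PySem.List.insertBy p x bs := by
  intro as
  induction as with
  | nil => intro bs _; simp
  | cons a t ih =>
    intro bs h
    have ha : p x a = false := h a (List.mem_cons_self)
    simp only [List.cons_append, PySem.List.insertBy, ha]
    simp [ih bs (fun b hb => h b (List.mem_cons_of_mem _ hb))]

-- insertBy puts x in front when the predicate holds on every element
theorem pv_insertBy_front {α : Type} (p : α → α → Bool) (x : α) :
    ∀ (bs : List α), (∀ b ∈ bs, p x b = true) →
    PySem.List.insertBy p x bs = x :: bs := by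
  intro bs h
  cases bs with
  | nil => rfl
  | cons b t => simp [PySem.List.insertBy, h b (List.mem_cons_self)]

-- keys of elements of a bucket decomposition lie in the key list
theorem pv_mem_buckets_key {α : Type} (key : α → Int) (ds : List Int) (l : List α) (b : α)
    (hb : b ∈ ds.flatMap (fun c => l.filter (fun y => key y == c))) : key b ∈ ds := by
  rcases List.mem_flatMap.mp hb with ⟨c, hc, hbc⟩
  rcases List.mem_filter.mp hbc with ⟨_, hk⟩
  have : key b = c := by simpa using hk
  rw [this]; exact hc

-- inserting an element whose key is already a bucket key appends it at the end of its bucket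
theorem pv_insert_old_key {α : Type} (key : α → Int) :
    ∀ (ds : List Int), ds.Pairwise (fun a b => b < a) → ∀ (x : α) (l : List α), key x ∈ ds →
    PySem.List.insertBy (fun a b => decide (key b < key a)) x
        (ds.flatMap (fun c => l.filter (fun y => key y == c)))
      = ds.flatMap (fun c => (l ++ [x]).filter (fun y => key y == c)) := by
  intro ds
  induction ds with
  | nil => intro _ x l hx; cases hx
  | cons c t ih =>
    intro hpw x l hx
    rcases List.pairwise_cons.mp hpw with ⟨hct, ht⟩
    simp only [List.flatMap_cons]
    by_cases hxc : key x = c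
    · -- x belongs to the head bucket: skip it, then land in front of the rest
      have hskip : ∀ a ∈ l.filter (fun y => key y == c),
          (fun a b => decide (key b < key a)) x a = false := by
        intro a ha
        have : key a = c := by simpa using (List.mem_filter.mp ha).2
        simp [this, hxc]
      rw [pv_insertBy_skip _ _ _ _ hskip]
      have hfront : ∀ b ∈ t.flatMap (fun c => l.filter (fun y => key y == c)),
          (fun a b => decide (key b < key a)) x b = true := by
        intro b hb
        have hk := pv_mem_buckets_key key t l b hb
        have : key b < c := hct _ hk
        simp [hxc]; omega
      rw [pv_insertBy_front _ _ _ hfront]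
      have hhead : (l ++ [x]).filter (fun y => key y == c) = l.filter (fun y => key y == c) ++ [x] := by
        simp [List.filter_append, hxc]
      have htail : t.flatMap (fun c => (l ++ [x]).filter (fun y => key y == c))
          = t.flatMap (fun c => l.filter (fun y => key y == c)) := by
        apply pv_flatMap_congr
        intro d hd
        have : d < c := hct _ hd
        have : ¬ (key x = d) := by omega
        simp [List.filter_append, this]
      rw [hhead, htail]; simp
    · -- x's key is strictly below c: skip the head bucket and recurse
      have hxt : key x ∈ t := by
        rcases List.mem_cons.mp hx with h | h
        · exact absurd h hxc
        · exact h
      have hxlt : key x < c := hct _ hxt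
      have hskip : ∀ a ∈ l.filter (fun y => key y == c),
          (fun a b => decide (key b < key a)) x a = false := by
        intro a ha
        have : key a = c := by simpa using (List.mem_filter.mp ha).2
        simp [this]; omega
      rw [pv_insertBy_skip _ _ _ _ hskip, ih ht x l hxt]
      have hhead : (l ++ [x]).filter (fun y => key y == c) = l.filter (fun y => key y == c) := by
        have : ¬ (key x = c) := hxc
        simp [List.filter_append, this]
      rw [hhead]

-- inserting an element with a fresh key creates a fresh singleton bucket at the right place
theorem pv_insert_new_key {α : Type} (key : α → Int) :
    ∀ (ds : List Int), ds.Pairwise (fun a b => b < a) → ∀ (x : α) (l : List α), key x ∉ ds →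
    l.filter (fun y => key y == key x) = [] →
    PySem.List.insertBy (fun a b => decide (key b < key a)) x
        (ds.flatMap (fun c => l.filter (fun y => key y == c)))
      = (PySem.List.insertBy (fun a b => decide (b < a)) (key x) ds).flatMap
          (fun c => (l ++ [x]).filter (fun y => key y == c)) := by
  intro ds
  induction ds with
  | nil =>
    intro _ x l _ hl
    simp [PySem.List.insertBy, List.filter_append, hl]
  | cons c t ih =>
    intro hpw x l hx hl
    rcases List.pairwise_cons.mp hpw with ⟨hct, ht⟩
    have hxc : key x ≠ c := fun h => hx (by simp [h])
    by_cases hlt : c < key x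
    · -- new maximal bucket: x goes in front of everything
      have hfront : ∀ b ∈ (c :: t).flatMap (fun c => l.filter (fun y => key y == c)),
          (fun a b => decide (key b < key a)) x b = true := by
        intro b hb
        have hk := pv_mem_buckets_key key (c :: t) l b hb
        rcases List.mem_cons.mp hk with h | h
        · simp [h]; omega
        · have : key b < c := hct _ h
          simp; omega
      rw [pv_insertBy_front _ _ _ hfront]
      have hd : PySem.List.insertBy (fun a b => decide (b < a)) (key x) (c :: t)
          = key x :: c :: t := by
        simp [PySem.List.insertBy, hlt]
      rw [hd]
      simp only [List.flatMap_cons]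
      have hxbucket : (l ++ [x]).filter (fun y => key y == key x) = [x] := by
        simp [List.filter_append, hl]
      have hrest : (c :: t).flatMap (fun c => (l ++ [x]).filter (fun y => key y == c))
          = (c :: t).flatMap (fun c => l.filter (fun y => key y == c)) := by
        apply pv_flatMap_congr
        intro d hd'
        have : key x ≠ d := by
          rcases List.mem_cons.mp hd' with h | h
          · rw [h]; exact hxc
          · have : d < c := hct _ h
            omega
        simp [List.filter_append, this]
      rw [hxbucket]
      simp only [List.flatMap_cons] at hrest
      rw [hrest]
      rfl
    · -- key x < c: head bucket stays in front, recurse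
      have hxlt : key x < c := by
        rcases lt_or_ge (key x) c with h | h
        · exact h
        · exact absurd (lt_of_le_of_ne h (Ne.symm hxc)) hlt
      have hskip : ∀ a ∈ l.filter (fun y => key y == c),
          (fun a b => decide (key b < key a)) x a = false := by
        intro a ha
        have : key a = c := by simpa using (List.mem_filter.mp ha).2
        simp [this]; omega
      simp only [List.flatMap_cons]
      rw [pv_insertBy_skip _ _ _ _ hskip]
      have hxt : key x ∉ t := fun h => hx (List.mem_cons_of_mem _ h)
      rw [ih ht x l hxt hl]
      have hd : PySem.List.insertBy (fun a b => decide (b < a)) (key x) (c :: t)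
          = c :: PySem.List.insertBy (fun a b => decide (b < a)) (key x) t := by
        have : ¬ (c < key x) := hlt
        simp [PySem.List.insertBy, this]
      rw [hd]
      simp only [List.flatMap_cons]
      have hhead : (l ++ [x]).filter (fun y => key y == c) = l.filter (fun y => key y == c) := by
        simp [List.filter_append, hxc]
      rw [hhead]

-- distinct keys, sorted descending, are pairwise strictly decreasing
theorem pv_ds_pairwise {κ : Type} [LinearOrder κ] [BEq κ] [LawfulBEq κ] (xs : List κ) :
    (PySem.List.sorted (PySem.Set.ofList xs) (fun x => x) true).Pairwise (fun a b => b < a) := by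
  have h1 : (PySem.List.sorted (PySem.Set.ofList xs) (fun x => x) true).Pairwise
      (fun a b => (fun x => x) b ≤ (fun x => x) a) :=
    PySem.List.sorted_pairwise_rev _ _
  have h2 : (PySem.List.sorted (PySem.Set.ofList xs) (fun x => x) true).Nodup :=
    (PySem.List.sorted_perm _ _ _).nodup_iff.mpr (PySem.Set.nodup_ofList xs)
  exact (h1.and h2).imp (fun h => lt_of_le_of_ne h.1 (Ne.symm h.2))

-- THE BUCKET CHARACTERISATION of Python's stable descending sort: sorted(l, key, reverse=True)
-- is the concatenation, over the distinct key values in descending order, of the elements of l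
-- with that key in original order.
theorem pv_sorted_rev_buckets {α : Type} (key : α → Int) (l : List α) :
    PySem.List.sorted l key true
      = (PySem.List.sorted (PySem.Set.ofList (l.map key)) (fun x => x) true).flatMap
          (fun c => l.filter (fun y => key y == c)) := by
  induction l using List.reverseRecOn with
  | nil => rfl
  | append_singleton t x ih =>
    rw [PySem.List.sorted_rev_eq_foldl_insertBy, List.foldl_append,
        ← PySem.List.sorted_rev_eq_foldl_insertBy]
    simp only [List.foldl_cons, List.foldl_nil]
    rw [ih]
    have hmapapp : (t ++ [x]).map key = t.map key ++ [key x] := by simp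
    by_cases hmem : key x ∈ t.map key
    · -- old key: the distinct-key list is unchanged
      have hset : PySem.Set.ofList ((t ++ [x]).map key) = PySem.Set.ofList (t.map key) := by
        rw [hmapapp]
        show List.foldl PySem.Set.add PySem.Set.empty (t.map key ++ [key x]) = _
        rw [List.foldl_append]
        simp only [List.foldl_cons, List.foldl_nil]
        have hm : key x ∈ PySem.Set.ofList (t.map key) := (PySem.Set.mem_ofList _ _).mpr hmem
        simp only [PySem.Set.ofList, PySem.Set.empty] at hm
        simp [PySem.Set.add, hm]
        rfl
      rw [hset]
      apply pv_insert_old_key key _ (pv_ds_pairwise _) x t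
      rw [PySem.List.mem_sorted]
      exact (PySem.Set.mem_ofList _ _).mpr hmem
    · -- new key: the key is inserted into the distinct-key list
      have hset : PySem.Set.ofList ((t ++ [x]).map key)
          = PySem.Set.ofList (t.map key) ++ [key x] := by
        rw [hmapapp]
        show List.foldl PySem.Set.add PySem.Set.empty (t.map key ++ [key x]) = _
        rw [List.foldl_append]
        simp only [List.foldl_cons, List.foldl_nil]
        have hm : key x ∉ PySem.Set.ofList (t.map key) := by
          intro h
          exact hmem ((PySem.Set.mem_ofList (t.map key) (key x)).mp h)
        simp only [PySem.Set.ofList, PySem.Set.empty] at hm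
        simp [PySem.Set.add, hm]
        rfl
      have hsorted : PySem.List.sorted (PySem.Set.ofList ((t ++ [x]).map key)) (fun x => x) true
          = PySem.List.insertBy (fun a b => decide (b < a)) (key x)
              (PySem.List.sorted (PySem.Set.ofList (t.map key)) (fun x => x) true) := by
        rw [hset, PySem.List.sorted_rev_eq_foldl_insertBy, List.foldl_append,
            ← PySem.List.sorted_rev_eq_foldl_insertBy]
        simp only [List.foldl_cons, List.foldl_nil]
      rw [hsorted]
      apply pv_insert_new_key key _ (pv_ds_pairwise _) x t
      · intro h
        exact hmem ((PySem.Set.mem_ofList (t.map key) (key x)).mp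
          ((PySem.List.mem_sorted _ _ _ _).mp h))
      · apply List.filter_eq_nil_iff.mpr
        intro y hy hk
        have hyk : key y = key x := by simpa using hk
        exact hmem (List.mem_map.mpr ⟨y, hy, hyk⟩)

-- a bucket filtered by "count > 1" is itself or empty, depending on its key
theorem pv_bucket_filter {α : Type} (items : List (α × Int)) (c : Int) :
    (items.filter (fun kv => kv.2 == c)).filter (fun kv => decide (1 < kv.2))
      = if decide (1 < c) then items.filter (fun kv => kv.2 == c) else [] := by
  by_cases h : 1 < c
  · rw [if_pos (by simpa using h)]
    apply List.filter_eq_self.mpr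
    intro kv hkv
    have : kv.2 = c := by simpa using (List.mem_filter.mp hkv).2
    simp [this, h]
  · rw [if_neg (by simpa using h)]
    apply List.filter_eq_nil_iff.mpr
    intro kv hkv
    have : kv.2 = c := by simpa using (List.mem_filter.mp hkv).2
    simp [this, h]

-- ===== VERDICT (by name: the statement is the Claim_ definition above) =====
theorem extract_topics_from_queries_py_spec : Claim_equal_extract_topics_from_queries_py := by
  intro queries _
  unfold Spec_extract_topics_from_queries_py
  unfold extract_topics_from_queries_py extract_topics_from_queries_py_alt
  simp only []
  -- both word-collection loops build the same flat list of kept words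
  rw [PySem.List.foldl_append_eq_flatMap]
  simp only [List.nil_append]
  have hwords :
      (queries.foldl (fun acc q =>
        (PySem.Str.split₀ (PySem.Str.lower q)).foldl (fun acc w =>
          if decide (4 < PySem.Str.len w) && !(["what", "how", "why", "when", "where"].contains w)
          then acc ++ [w] else acc) acc) ([] : List String))
      = queries.flatMap (fun query =>
          (PySem.Str.split₀ (PySem.Str.lower query)).filter
            (fun w => decide (4 < PySem.Str.len w) && !(["what", "how", "why", "when", "where"].contains w))) := by
    have h0 := PySem.List.foldl_append_eq_flatMap (fun query =>
        (PySem.Str.split₀ (PySem.Str.lower query)).filter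
          (fun w => decide (4 < PySem.Str.len w) && !(["what", "how", "why", "when", "where"].contains w)))
      queries []
    simp only [List.nil_append] at h0
    rw [← h0]
    apply PySem.List.foldl_congr_mem
    intro acc q _
    rw [PySem.List.foldl_append_if]
    simp
  rw [hwords]
  set W := queries.flatMap (fun query =>
      (PySem.Str.split₀ (PySem.Str.lower query)).filter
        (fun w => decide (4 < PySem.Str.len w) && !(["what", "how", "why", "when", "where"].contains w))) with hW
  -- B's pairs are exactly Counter(W).items
  have hpairs : (PySem.List.dedup W).map (fun w => (w, (PySem.List.count W w : Int)))
      = (PySem.Dict.counter W).items := by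
    rw [PySem.Dict.items_counter, PySem.List.dedup_eq_ofList]
    apply List.map_congr_left
    intro w _
    simp [PySem.List.count_eq]
  rw [hpairs]
  set items := (PySem.Dict.counter W).items with hitems
  -- B's bucket loop is a flatMap over the distinct counts
  have hloop :
      ((PySem.List.sorted (PySem.Set.ofList (items.map (fun kv => kv.2))) (fun x => x) true).foldl
        (fun acc c =>
          if decide (1 < c)
          then acc ++ (items.filter (fun kv => kv.2 == c)).map (fun kv => kv.1)
          else acc) [])
      = (PySem.List.sorted (PySem.Set.ofList (items.map (fun kv => kv.2))) (fun x => x) true).flatMap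
          (fun c => if decide (1 < c)
                    then (items.filter (fun kv => kv.2 == c)).map (fun kv => kv.1)
                    else []) := by
    have h0 := PySem.List.foldl_append_eq_flatMap (fun c =>
        if decide (1 < c)
        then (items.filter (fun kv => kv.2 == c)).map (fun kv => kv.1)
        else ([] : List String))
      (PySem.List.sorted (PySem.Set.ofList (items.map (fun kv => kv.2))) (fun x => x) true) []
    simp only [List.nil_append] at h0
    rw [← h0]
    apply PySem.List.foldl_congr_mem
    intro acc c _
    split <;> simp
  rw [hloop]
  -- A: commute take with the count>1 filter, then use the bucket characterisation
  set s := PySem.List.sorted items (fun kv => kv.2) true with hs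
  have hpair : s.Pairwise (fun a b => decide (1 < b.2) = true → decide (1 < a.2) = true) := by
    refine (PySem.List.sorted_pairwise_rev _ _).imp ?_
    intro a b hle hb
    simp only [decide_eq_true_eq] at *
    omega
  rw [pv_take_filter_comm _ s 10 hpair, List.map_take]
  congr 1
  rw [hs, pv_sorted_rev_buckets (fun kv => kv.2) items, List.filter_flatMap, List.map_flatMap]
  apply pv_flatMap_congr
  intro c _
  rw [pv_bucket_filter]
  split <;> simp
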